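-- pv_equiv track=rewrite | github.com/lajoal/Utube_videos | reporting.py | validate_text_target
-- ===== SOURCE A (Python) =====
-- def parse_labeled_sections_from_text(text: str | None) -> list[tuple[str, str]]:
--     sections: list[tuple[str, str]] = []
--     if text is None:
--         return sections
--
--     current_label: str | None = None
--     current_lines: list[str] = []
--
--     for raw_line in text.splitlines():
--         stripped = raw_line.strip()
--         if stripped.startswith("[") and stripped.endswith("]"):
--             if current_label is not None:
--                 sections.append((current_label, "\n".join(current_lines).strip()))
--             current_label = stripped[1:-1].strip()
--             current_lines = []
--             continue
--
--         if current_label is not None: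
--             current_lines.append(raw_line)
--
--     if current_label is not None:
--         sections.append((current_label, "\n".join(current_lines).strip()))
--
--     return [(label, content) for label, content in sections if label]
--
-- def parse_scene_labels_from_text(text: str | None) -> list[str]:
--     return [label for label, _ in parse_labeled_sections_from_text(text)]
--
-- def validate_text_target(filename: str, text: str | None) -> list[str]:
--     issues: list[str] = []
--
--     if text is None:
--         return ["File could not be decoded as UTF-8 text."]
--
--     non_empty_lines = [line.strip() for line in text.splitlines() if line.strip()]
--     if not non_empty_lines:
--         return ["File is empty."]
--
--     if filename == "image_generation_prompts_ko.txt":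
--         if not parse_scene_labels_from_text(text):
--             issues.append("Expected at least one scene label like [scene_01_intro].")
--     elif filename == "tts_script_ko.txt":
--         if len(non_empty_lines) < 2:
--             issues.append("Expected at least two non-empty lines in the TTS script.")
--
--     return issues
-- ===== SOURCE B (Python) =====
-- def validate_text_target(filename, text):
--     if text is None:
--         return ["File could not be decoded as UTF-8 text."]
--
--     non_empty_lines = [s for s in (line.strip() for line in text.splitlines()) if s]
--     if not non_empty_lines:
--         return ["File is empty."]
--
--     if filename == "image_generation_prompts_ko.txt":
--         if not any(s.startswith("[") and s.endswith("]") and s[1:-1].strip()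
--                    for s in non_empty_lines):
--             return ["Expected at least one scene label like [scene_01_intro]."]
--     elif filename == "tts_script_ko.txt":
--         if len(non_empty_lines) < 2:
--             return ["Expected at least two non-empty lines in the TTS script."]
--     return []
-- ===== Notes on version B (the rewrite author's own statement) =====
-- stated objective: simpler
-- what changed: The image-generation branch no longer builds the full list of labeled sections (section accumulator with current_label/current_lines, content joining, pair filtering); it checks directly with any(...) whether some stripped line is a non-empty bracket label.
import Mathlib
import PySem

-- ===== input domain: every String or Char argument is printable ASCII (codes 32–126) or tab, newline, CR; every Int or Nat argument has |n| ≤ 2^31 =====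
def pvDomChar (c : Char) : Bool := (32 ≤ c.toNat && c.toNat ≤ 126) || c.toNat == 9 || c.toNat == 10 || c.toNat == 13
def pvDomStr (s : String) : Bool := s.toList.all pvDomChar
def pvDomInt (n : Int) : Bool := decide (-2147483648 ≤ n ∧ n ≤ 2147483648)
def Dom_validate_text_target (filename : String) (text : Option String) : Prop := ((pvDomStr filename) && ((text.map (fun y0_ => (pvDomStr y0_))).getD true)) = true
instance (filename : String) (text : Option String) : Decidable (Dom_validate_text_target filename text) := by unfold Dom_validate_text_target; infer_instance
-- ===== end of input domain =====

-- B computes the image-generation check directly with a single any-pass over the lines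
-- instead of building the full list of labeled sections; objective: simpler.


-- ===== PORT A =====
-- state of A's loop: (sections, current_label, current_lines)
def pvStateA := List (String × String) × Option String × List String

def pvStepA (st : pvStateA) (raw_line : String) : pvStateA :=
  let stripped := PySem.Str.strip raw_line
  if PySem.Str.startswith stripped "[" && PySem.Str.endswith stripped "]" then
    (match st.2.1 with
     | some lbl => st.1 ++ [(lbl, PySem.Str.strip (PySem.Str.join "\n" st.2.2))]
     | none => st.1,
     some (PySem.Str.strip (PySem.Str.slice stripped (some 1) (some (-1)))), ([] : List String))
  else
    match st.2.1 with
    | some _ => (st.1, st.2.1, st.2.2 ++ [raw_line])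
    | none => st

def parse_labeled_sections_from_text (text : Option String) : List (String × String) :=
  match text with
  | none => []
  | some t =>
    let st := (PySem.Str.splitlines t).foldl pvStepA ([], none, [])
    let sections :=
      match st.2.1 with
      | some lbl => st.1 ++ [(lbl, PySem.Str.strip (PySem.Str.join "\n" st.2.2))]
      | none => st.1
    sections.filter (fun p => p.1 != "")

def parse_scene_labels_from_text (text : Option String) : List String :=
  (parse_labeled_sections_from_text text).map Prod.fst

def validate_text_target (filename : String) (text : Option String) : List String :=
  match text with
  | none => ["File could not be decoded as UTF-8 text."]
  | some t =>
    let non_empty_lines :=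
      (PySem.Str.splitlines t).filterMap
        (fun line => let s := PySem.Str.strip line; if s != "" then some s else none)
    if non_empty_lines = [] then ["File is empty."]
    else if filename = "image_generation_prompts_ko.txt" then
      if parse_scene_labels_from_text text = [] then
        ["Expected at least one scene label like [scene_01_intro]."]
      else []
    else if filename = "tts_script_ko.txt" then
      if non_empty_lines.length < 2 then
        ["Expected at least two non-empty lines in the TTS script."]
      else []
    else []

-- ===== PORT B =====
-- is the (already stripped) line a bracket label with non-empty inner text?
def pvGoodLabel (s : String) : Bool :=
  PySem.Str.startswith s "[" && PySem.Str.endswith s "]" &&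
    PySem.Str.strip (PySem.Str.slice s (some 1) (some (-1))) != ""

def validate_text_target_alt (filename : String) (text : Option String) : List String :=
  match text with
  | none => ["File could not be decoded as UTF-8 text."]
  | some t =>
    let non_empty_lines :=
      (PySem.Str.splitlines t).filterMap
        (fun line => let s := PySem.Str.strip line; if s != "" then some s else none)
    if non_empty_lines = [] then ["File is empty."]
    else if filename = "image_generation_prompts_ko.txt" then
      if !(non_empty_lines.any pvGoodLabel) then
        ["Expected at least one scene label like [scene_01_intro]."]
      else []
    else if filename = "tts_script_ko.txt" then
      if non_empty_lines.length < 2 then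
        ["Expected at least two non-empty lines in the TTS script."]
      else []
    else []

-- ===== PRECONDITION & SPEC =====
def Spec_validate_text_target (filename : String) (text : Option String) (out : List String) : Prop := out = validate_text_target_alt filename text
instance (filename : String) (text : Option String) (out : List String) : Decidable (Spec_validate_text_target filename text out) := by unfold Spec_validate_text_target; infer_instance

-- ===== CLAIM (what is proved, stated in full; the proofs are below) =====
def Claim_equal_validate_text_target : Prop := ∀ (filename : String) (text : Option String), Dom_validate_text_target filename text → Spec_validate_text_target filename text (validate_text_target filename text)

-- ===== LEMMAS AND PROOFS =====

-- does the state already guarantee a nonempty-label section in the final output?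
def pvLive (st : pvStateA) : Bool :=
  st.1.any (fun p => p.1 != "") ||
    (match st.2.1 with | some l => l != "" | none => false)

theorem pvLive_step (st : pvStateA) (raw : String) :
    pvLive (pvStepA st raw) = (pvLive st || pvGoodLabel (PySem.Str.strip raw)) := by
  obtain ⟨secs, lbl?, lns⟩ := st
  simp only [pvStepA, pvLive, pvGoodLabel]
  by_cases hb : (PySem.Str.startswith (PySem.Str.strip raw) "[" &&
      PySem.Str.endswith (PySem.Str.strip raw) "]") = true
  · simp only [hb]
    cases lbl? with
    | none => simp [Bool.or_comm]
    | some l =>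
      simp only []
      cases h : (l != "") <;> cases hs : (PySem.Str.strip (PySem.Str.slice (PySem.Str.strip raw) (some 1) (some (-1))) != "") <;>
        simp [h, hs, Bool.or_comm]
  · rw [if_neg hb]
    simp only [Bool.and_eq_true, not_and] at hb ⊢
    have : (PySem.Str.startswith (PySem.Str.strip raw) "[" &&
        PySem.Str.endswith (PySem.Str.strip raw) "]" &&
        (PySem.Str.strip (PySem.Str.slice (PySem.Str.strip raw) (some 1) (some (-1))) != "")) = false := by
      cases h1 : PySem.Str.startswith (PySem.Str.strip raw) "[" <;>
        cases h2 : PySem.Str.endswith (PySem.Str.strip raw) "]" <;> simp_all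
    rw [this, Bool.or_false]
    cases lbl? <;> rfl

theorem pvLive_foldl (ls : List String) (st : pvStateA) :
    pvLive (ls.foldl pvStepA st) =
      (pvLive st || ls.any (fun raw => pvGoodLabel (PySem.Str.strip raw))) := by
  induction ls generalizing st with
  | nil => simp
  | cons a tl ih =>
    simp only [List.foldl_cons, List.any_cons, ih, pvLive_step, Bool.or_assoc]

-- an empty (stripped) string is never a good label
theorem pvGoodLabel_empty : pvGoodLabel "" = false := by decide

-- A's scene-label list is empty exactly when no line is a good bracket label
theorem parse_scene_labels_empty_iff (t : String) :
    (parse_scene_labels_from_text (some t) = []) ↔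
      ((PySem.Str.splitlines t).any (fun raw => pvGoodLabel (PySem.Str.strip raw)) = false) := by
  simp only [parse_scene_labels_from_text, parse_labeled_sections_from_text,
    List.map_eq_nil_iff, List.filter_eq_nil_iff]
  have hlive := pvLive_foldl (PySem.Str.splitlines t) ([], none, [])
  simp only [pvLive, List.any_nil, Bool.false_or] at hlive
  set st := ((PySem.Str.splitlines t).foldl pvStepA ([], none, [])) with hst
  constructor
  · intro h
    by_contra hany
    simp only [Bool.not_eq_false] at hany
    rw [hany] at hlive
    revert hlive
    match hm : st.2.1 with
    | some l =>
      intro hlive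
      rcases Bool.or_eq_true_iff.mp hlive with h1 | h2
      · obtain ⟨p, hp, hne⟩ := List.any_eq_true.mp h1
        exact absurd hne (by simpa using h p (by rw [hm]; exact List.mem_append_left _ hp))
      · exact absurd h2 (by
          simpa using h (l, PySem.Str.strip (PySem.Str.join "\n" st.2.2))
            (by rw [hm]; exact List.mem_append_right _ (List.mem_singleton.mpr rfl)))
    | none =>
      intro hlive
      simp only [Bool.or_false] at hlive
      obtain ⟨p, hp, hne⟩ := List.any_eq_true.mp hlive
      exact absurd hne (by simpa using h p (by rw [hm]; exact hp))
  · intro hany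
    rw [hany] at hlive
    simp only [Bool.or_eq_false_iff] at hlive
    obtain ⟨hA, hB⟩ := hlive
    intro p hp
    revert hB hp
    match hm : st.2.1 with
    | some l =>
      intro hB hp
      rcases List.mem_append.mp hp with h1 | h2
      · simpa using List.any_eq_false.mp hA p h1
      · rw [List.mem_singleton.mp h2]; simpa using hB
    | none =>
      intro _ hp
      simpa using List.any_eq_false.mp hA p hp

-- B's any over the stripped non-empty lines equals the any over all raw lines
theorem any_filterMap_good (ls : List String) :
    (ls.filterMap (fun line => let s := PySem.Str.strip line; if s != "" then some s else none)).any pvGoodLabel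
      = ls.any (fun raw => pvGoodLabel (PySem.Str.strip raw)) := by
  induction ls with
  | nil => simp
  | cons a tl ih =>
    rw [List.filterMap_cons, List.any_cons]
    have hf : (let s := PySem.Str.strip a; if s != "" then some s else none)
        = (if PySem.Str.strip a != "" then some (PySem.Str.strip a) else none) := rfl
    rw [hf]
    by_cases h : (PySem.Str.strip a != "") = true
    · rw [if_pos h, List.any_cons, ih]
    · have h0 : PySem.Str.strip a = "" := by simpa using h
      rw [if_neg h, ih, h0, pvGoodLabel_empty, Bool.false_or]

-- ===== VERDICT (by name: the statement is the Claim_ definition above) =====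
theorem validate_text_target_spec : Claim_equal_validate_text_target := by
  intro filename text _
  unfold Spec_validate_text_target
  cases text with
  | none => rfl
  | some t =>
    simp only [validate_text_target, validate_text_target_alt]
    by_cases h0 : ((PySem.Str.splitlines t).filterMap
        (fun line => let s := PySem.Str.strip line; if s != "" then some s else none)) = []
    · rw [if_pos h0, if_pos h0]
    · rw [if_neg h0, if_neg h0]
      by_cases hf : filename = "image_generation_prompts_ko.txt"
      · rw [if_pos hf, if_pos hf]
        by_cases hp : parse_scene_labels_from_text (some t) = []
        · rw [if_pos hp]
          have := (parse_scene_labels_empty_iff t).mp hp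
          rw [if_pos (by rw [any_filterMap_good, this]; rfl)]
        · rw [if_neg hp]
          have : (PySem.Str.splitlines t).any (fun raw => pvGoodLabel (PySem.Str.strip raw)) = true := by
            cases hA : (PySem.Str.splitlines t).any (fun raw => pvGoodLabel (PySem.Str.strip raw))
            · exact absurd ((parse_scene_labels_empty_iff t).mpr hA) hp
            · rfl
          rw [if_neg (by rw [any_filterMap_good, this]; simp)]
      · rw [if_neg hf, if_neg hf]
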